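-- pv_equiv track=rewrite | github.com/babiiigirl/Python | PYKT088_SoCo9UocSo.py | count_case1
-- ===== SOURCE A (Python) =====
-- def count_case1(N):
--     """Đếm số có dạng p^8 <= N."""
--     count = 0
--     small_primes = [2, 3, 5, 7, 11, 13]
--     for p in small_primes:
--         try:
--             val = p ** 8
--             if val <= N:
--                 count += 1
--             else:
--                 break # Vì các số nguyên tố đã sắp xếp
--         except OverflowError:
--             break
--     return count
-- ===== SOURCE B (Python) =====
-- def count_case1(N):
--     """Đếm số có dạng p^8 <= N, by binary search in a precomputed power table."""
--     powers = [256, 6561, 390625, 5764801, 214358881, 815730721]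
--     lo, hi = 0, len(powers)
--     while lo < hi:
--         mid = (lo + hi) // 2
--         if powers[mid] <= N:
--             lo = mid + 1
--         else:
--             hi = mid
--     return lo
-- ===== Notes on version B (the rewrite author's own statement) =====
-- stated objective: alternative
-- what changed: Replaces the prime loop that exponentiates each prime and breaks early by a hand-written bisect_right binary search into a precomputed table of the six eighth powers.
import Mathlib
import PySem

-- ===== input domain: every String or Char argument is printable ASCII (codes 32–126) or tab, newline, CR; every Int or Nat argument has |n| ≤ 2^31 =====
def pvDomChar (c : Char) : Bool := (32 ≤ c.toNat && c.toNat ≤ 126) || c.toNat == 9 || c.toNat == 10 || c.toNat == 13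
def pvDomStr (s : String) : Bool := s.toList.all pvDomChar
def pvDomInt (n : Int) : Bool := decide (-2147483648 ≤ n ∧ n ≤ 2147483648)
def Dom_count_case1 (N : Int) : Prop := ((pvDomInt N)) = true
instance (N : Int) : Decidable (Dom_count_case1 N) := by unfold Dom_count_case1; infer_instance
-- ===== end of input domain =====

-- ===== PORT A =====
def count_case1_loop (N : Int) (count : Int) : List Int → Int
  | [] => count
  | p :: ps =>
      let val := p ^ 8
      if val ≤ N then count_case1_loop N (count + 1) ps
      else count  -- break

-- Port A: loop over the small primes, p**8 each step, early break when val > N.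
def count_case1 (N : Int) : Int :=
  count_case1_loop N 0 [2, 3, 5, 7, 11, 13]

-- ===== PORT B =====
-- index mid is always in range (0 ≤ lo ≤ mid < hi ≤ len), so getD is exact for powers[mid]
def count_case1_bs (powers : List Int) (N : Int) (lo hi : Nat) : Nat :=
  if _h : lo < hi then
    let mid := (lo + hi) / 2
    if powers.getD mid 0 ≤ N then count_case1_bs powers N (mid + 1) hi
    else count_case1_bs powers N lo mid
  else lo
termination_by hi - lo
decreasing_by all_goals omega

-- Port B: hand-written bisect_right on the precomputed table of eighth powers.
def count_case1_alt (N : Int) : Int :=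
  let powers : List Int := [256, 6561, 390625, 5764801, 214358881, 815730721]
  (count_case1_bs powers N 0 powers.length : Int)

-- ===== PRECONDITION & SPEC =====
def Spec_count_case1 (N : Int) (out : Int) : Prop := out = count_case1_alt N
instance (N : Int) (out : Int) : Decidable (Spec_count_case1 N out) := by unfold Spec_count_case1; infer_instance

-- ===== CLAIM (what is proved, stated in full; the proofs are below) =====
def Claim_equal_count_case1 : Prop := ∀ (N : Int), Dom_count_case1 N → Spec_count_case1 N (count_case1 N)

-- ===== LEMMAS AND PROOFS =====

-- ===== VERDICT (by name: the statement is the Claim_ definition above) =====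
theorem count_case1_spec : Claim_equal_count_case1 := by
  intro N _
  unfold Spec_count_case1 count_case1 count_case1_alt
  simp only [count_case1_loop]
  unfold count_case1_bs count_case1_bs count_case1_bs count_case1_bs count_case1_bs
  norm_num
  split_ifs <;> omega
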